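-- pv_equiv track=rewrite | github.com/satyaholla/Programming-Assignments | 6.0001 Psets/1_ps3/document_distance.py | compute_most_frequent
-- ===== SOURCE A (Python) =====
-- def sortedListOfDictMax(dict1):
--     words = []
--     m = max(dict1.values())
--     for k in dict1:
--         if dict1[k] == m:
--             words.append(k)
--     words.sort()
--     return words
--
-- def compute_most_frequent(dict1, dict2):
--     """
--     The keys of dict1 and dict2 are all lowercase,
--     you will NOT need to worry about case sensitivity.
--
--     Args:
--         dict1: frequency dictionary for one text
--         dict2: frequency dictionary for another text
--     Returns:
--         list of the most frequent word(s) in the input dictionaries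
--
--     The most frequent word:
--         * is based on the combined word frequencies across both dictionaries.
--           If a word occurs in both dictionaries, consider the sum the
--           freqencies as the combined word frequency.
--         * need not be in both dictionaries, i.e it can be exclusively in
--           dict1, dict2, or shared by dict1 and dict2.
--     If multiple words are tied (i.e. share the same highest frequency),
--     return an alphabetically ordered list of all these words.
--     """
--     totalFreq = dict(dict1)
--     for k in dict2:
--         if k in totalFreq:
--             totalFreq[k] += dict2[k]
--         else:
--             totalFreq[k] = dict2[k]
--     return sortedListOfDictMax(totalFreq)
-- ===== SOURCE B (Python) =====
-- def compute_most_frequent(dict1, dict2):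
--     combined = {}
--     for w, c in list(dict1.items()) + list(dict2.items()):
--         combined[w] = combined.get(w, 0) + c
--     groups = {}
--     for w, c in combined.items():
--         groups.setdefault(c, []).append(w)
--     return sorted(groups[max(groups)])
-- ===== Notes on version B (the rewrite author's own statement) =====
-- stated objective: alternative
-- what changed: B merges both dicts in one accumulating pass over the concatenated item lists, then builds an inverted index frequency->words and returns the sorted bucket of the max frequency, instead of A's copy-then-conditional-update merge followed by a separate max pass and a filter pass over keys.
import Mathlib
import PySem

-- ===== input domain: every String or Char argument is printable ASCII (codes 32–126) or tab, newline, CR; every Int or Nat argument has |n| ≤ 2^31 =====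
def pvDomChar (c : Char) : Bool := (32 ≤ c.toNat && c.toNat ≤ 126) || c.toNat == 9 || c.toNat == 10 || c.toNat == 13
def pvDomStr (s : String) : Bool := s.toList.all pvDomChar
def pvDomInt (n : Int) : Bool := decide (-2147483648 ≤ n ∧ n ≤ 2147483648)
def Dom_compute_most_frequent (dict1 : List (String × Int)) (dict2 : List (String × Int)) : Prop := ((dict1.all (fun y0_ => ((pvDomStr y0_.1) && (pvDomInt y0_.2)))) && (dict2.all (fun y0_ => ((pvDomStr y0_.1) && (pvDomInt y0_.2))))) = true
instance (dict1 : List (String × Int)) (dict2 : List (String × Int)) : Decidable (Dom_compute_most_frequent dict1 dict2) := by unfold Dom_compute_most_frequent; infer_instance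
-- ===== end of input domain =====

-- B merges in one pass over the concatenated item lists and reads the answer off an
-- inverted index frequency -> words (sorted bucket of the max frequency), instead of A's
-- conditional-update merge followed by a separate max pass and a filter pass over the keys.

-- ===== PORT A =====
-- A's helper: m = max(values); collect keys with value m in insertion order; sort.
-- max() raises ValueError on an empty dict: `none` there (excluded by Pre_).
def sortedListOfDictMax (d : PySem.Dict String Int) : Option (List String) :=
  match PySem.List.max? d.values (fun v => v) with
  | none => none
  | some m =>
      let words := d.keys.foldl (fun ws k => if d.getD k 0 == m then ws ++ [k] else ws) []
      some (PySem.List.sorted words (fun x => x) false)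

def compute_most_frequent (dict1 : List (String × Int)) (dict2 : List (String × Int)) : List String :=
  let d2 := PySem.Dict.ofList dict2
  let totalFreq :=
    d2.keys.foldl
      (fun t k =>
        if t.contains k then t.insert k (t.getD k 0 + d2.getD k 0)
        else t.insert k (d2.getD k 0))
      (PySem.Dict.ofList dict1)
  (sortedListOfDictMax totalFreq).getD []

-- ===== PORT B =====
def compute_most_frequent_alt (dict1 : List (String × Int)) (dict2 : List (String × Int)) : List String :=
  let combined :=
    ((PySem.Dict.ofList dict1).items ++ (PySem.Dict.ofList dict2).items).foldl
      (fun d p => d.modify p.1 0 (· + p.2)) PySem.Dict.empty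
  let groups :=
    combined.items.foldl (fun g p => g.modify p.2 [] (· ++ [p.1]))
      (PySem.Dict.empty : PySem.Dict Int (List String))
  match PySem.List.max? groups.keys (fun v => v) with
  | none => []   -- max(groups) raises on empty input (excluded by Pre_)
  | some best => PySem.List.sorted (groups.getD best []) (fun x => x) false

-- ===== PRECONDITION & SPEC =====
-- A raises ValueError (max() of an empty sequence) exactly when both dicts are empty.
def Pre_compute_most_frequent (dict1 : List (String × Int)) (dict2 : List (String × Int)) : Prop :=
  dict1 ≠ [] ∨ dict2 ≠ []
instance (dict1 : List (String × Int)) (dict2 : List (String × Int)) : Decidable (Pre_compute_most_frequent dict1 dict2) := by unfold Pre_compute_most_frequent; infer_instance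
def pvWitness_compute_most_frequent : (List (String × Int)) × (List (String × Int)) :=
  ([("a", 3), ("b", 5)], [("b", 2), ("c", 7)])

def Spec_compute_most_frequent (dict1 : List (String × Int)) (dict2 : List (String × Int)) (out : List String) : Prop := out = compute_most_frequent_alt dict1 dict2
instance (dict1 : List (String × Int)) (dict2 : List (String × Int)) (out : List String) : Decidable (Spec_compute_most_frequent dict1 dict2 out) := by unfold Spec_compute_most_frequent; infer_instance

-- ===== CLAIM (what is proved, stated in full; the proofs are below) =====
def Claim_equal_compute_most_frequent : Prop := ∀ (dict1 : List (String × Int)) (dict2 : List (String × Int)), Dom_compute_most_frequent dict1 dict2 → Pre_compute_most_frequent dict1 dict2 → Spec_compute_most_frequent dict1 dict2 (compute_most_frequent dict1 dict2)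

-- ===== LEMMAS AND PROOFS =====

-- A's conditional-update step is insert with the summed value (else-branch has getD = 0)
lemma if_insert_eq_insert (t : PySem.Dict String Int) (k : String) (v : Int) :
    (if t.contains k then t.insert k (t.getD k 0 + v) else t.insert k v)
      = t.insert k (t.getD k 0 + v) := by
  by_cases h : t.contains k = true
  · simp [h]
  · simp only [Bool.not_eq_true] at h
    rw [PySem.Dict.getD_of_not_contains _ _ h]
    simp [h]

-- a summing-insert fold over fresh, distinct keys is a plain insert fold
lemma foldl_sum_insert_fresh (l : List (String × Int)) (d : PySem.Dict String Int)
    (hfresh : ∀ p ∈ l, d.contains p.1 = false) (hnd : (l.map Prod.fst).Nodup) :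
    l.foldl (fun t p => t.insert p.1 (t.getD p.1 0 + p.2)) d
      = l.foldl (fun t p => t.insert p.1 p.2) d := by
  induction l generalizing d with
  | nil => rfl
  | cons p rest ih =>
      simp only [List.foldl_cons]
      rw [PySem.Dict.getD_of_not_contains _ _ (hfresh p (by simp)), zero_add]
      apply ih
      · intro q hq
        rw [PySem.Dict.contains_insert]
        simp only [List.map_cons, List.nodup_cons] at hnd
        have : q.1 ≠ p.1 := fun h => hnd.1 (h ▸ List.mem_map_of_mem hq)
        simp [this, hfresh q (List.mem_cons_of_mem _ hq)]
      · simp only [List.map_cons, List.nodup_cons] at hnd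
        exact hnd.2

-- replaying a nodup-keyed dict's items from empty rebuilds the dict
lemma replay_items (d : PySem.Dict String Int) (h : d.keys.Nodup) :
    d.items.foldl (fun t p => t.insert p.1 p.2) PySem.Dict.empty = d := by
  apply PySem.Dict.ext
  rw [PySem.Dict.items_foldl_insert_fresh d.items Prod.fst Prod.snd PySem.Dict.empty
        (fun a _ => PySem.Dict.contains_empty a.1) h]
  simp [show (PySem.Dict.empty : PySem.Dict String Int).items = [] from rfl]

-- a dict built from a nonempty pair list has an item
lemma ofList_items_ne_nil (l : List (String × Int)) (h : l ≠ []) :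
    (PySem.Dict.ofList l).items ≠ [] := by
  obtain ⟨p, rest, rfl⟩ := List.exists_cons_of_ne_nil h
  have hk : p.1 ∈ (PySem.Dict.ofList (p :: rest)).keys := by
    rw [show PySem.Dict.ofList (p :: rest)
          = (p :: rest).foldl (fun t q => t.insert q.1 q.2) PySem.Dict.empty from rfl,
        PySem.Dict.keys_foldl_insert_key _ Prod.fst (fun t q => q.2) PySem.Dict.empty,
        PySem.Set.mem_update]
    exact Or.inr (List.mem_map_of_mem (by simp))
  intro hnil
  rw [show (PySem.Dict.ofList (p :: rest)).keys
        = (PySem.Dict.ofList (p :: rest)).items.map Prod.fst from rfl, hnil] at hk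
  simp at hk

-- the two merge loops build the same dictionary
lemma merge_eq (dict1 dict2 : List (String × Int)) :
    ((PySem.Dict.ofList dict2).keys.foldl
        (fun t k =>
          if t.contains k then t.insert k (t.getD k 0 + (PySem.Dict.ofList dict2).getD k 0)
          else t.insert k ((PySem.Dict.ofList dict2).getD k 0))
        (PySem.Dict.ofList dict1))
      = ((PySem.Dict.ofList dict1).items ++ (PySem.Dict.ofList dict2).items).foldl
          (fun d p => d.modify p.1 0 (· + p.2)) PySem.Dict.empty := by
  have hA : ((PySem.Dict.ofList dict2).keys.foldl
        (fun t k =>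
          if t.contains k then t.insert k (t.getD k 0 + (PySem.Dict.ofList dict2).getD k 0)
          else t.insert k ((PySem.Dict.ofList dict2).getD k 0))
        (PySem.Dict.ofList dict1))
      = (PySem.Dict.ofList dict2).items.foldl
          (fun t p => t.insert p.1 (t.getD p.1 0 + p.2)) (PySem.Dict.ofList dict1) := by
    show ((PySem.Dict.ofList dict2).items.map Prod.fst).foldl _ _ = _
    rw [List.foldl_map]
    apply PySem.List.foldl_congr_mem
    intro t p hp
    rw [if_insert_eq_insert,
        PySem.Dict.getD_of_mem_items _ (by exact hp) (PySem.Dict.nodup_keys_ofList dict2)]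
  rw [hA, List.foldl_append]
  show _ = (PySem.Dict.ofList dict2).items.foldl
      (fun t p => t.insert p.1 (t.getD p.1 0 + p.2))
      ((PySem.Dict.ofList dict1).items.foldl
        (fun t p => t.insert p.1 (t.getD p.1 0 + p.2)) PySem.Dict.empty)
  rw [foldl_sum_insert_fresh _ PySem.Dict.empty
        (fun p _ => PySem.Dict.contains_empty p.1)
        (PySem.Dict.nodup_keys_ofList dict1),
      replay_items _ (PySem.Dict.nodup_keys_ofList dict1)]

-- ===== VERDICT (by name: the statement is the Claim_ definition above) =====
theorem compute_most_frequent_spec : Claim_equal_compute_most_frequent := by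
  intro dict1 dict2 _hdom hpre
  show (sortedListOfDictMax
      ((PySem.Dict.ofList dict2).keys.foldl
        (fun t k =>
          if t.contains k then t.insert k (t.getD k 0 + (PySem.Dict.ofList dict2).getD k 0)
          else t.insert k ((PySem.Dict.ofList dict2).getD k 0))
        (PySem.Dict.ofList dict1))).getD []
    = compute_most_frequent_alt dict1 dict2
  rw [merge_eq dict1 dict2]
  set T := ((PySem.Dict.ofList dict1).items ++ (PySem.Dict.ofList dict2).items).foldl
      (fun d p => d.modify p.1 0 (· + p.2)) PySem.Dict.empty with hT
  have hnd : T.keys.Nodup := by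
    rw [hT]
    exact PySem.Dict.nodup_keys_foldl_modify_key _ Prod.fst 0 (fun d p v => v + p.2)
      PySem.Dict.empty (by simp [show (PySem.Dict.empty : PySem.Dict String Int).keys = [] from rfl])
  have hkeys : T.keys = PySem.Set.update []
      (((PySem.Dict.ofList dict1).items ++ (PySem.Dict.ofList dict2).items).map Prod.fst) := by
    rw [hT]
    exact PySem.Dict.keys_foldl_modify_key _ Prod.fst 0 (fun d p v => v + p.2) PySem.Dict.empty
  -- T is nonempty (Pre_: one of the dicts is nonempty)
  have hitems : ((PySem.Dict.ofList dict1).items ++ (PySem.Dict.ofList dict2).items) ≠ [] := by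
    cases hpre with
    | inl h => simp [ofList_items_ne_nil dict1 h]
    | inr h => simp [ofList_items_ne_nil dict2 h]
  have hvne : T.values ≠ [] := by
    obtain ⟨p, rest, hpr⟩ := List.exists_cons_of_ne_nil hitems
    have hk : p.1 ∈ T.keys := by
      rw [hkeys, PySem.Set.mem_update]
      exact Or.inr (by rw [hpr]; exact List.mem_map_of_mem (by simp))
    have hiv : T.items ≠ [] := by
      intro hnil
      rw [show T.keys = T.items.map Prod.fst from rfl, hnil] at hk
      simp at hk
    intro hnil
    rw [show T.values = T.items.map Prod.snd from rfl] at hnil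
    exact hiv (List.map_eq_nil_iff.mp hnil)
  -- A's maximum value m
  cases hmax : PySem.List.max? T.values (fun v => v) with
  | none => exact absurd ((PySem.List.max?_eq_none_iff _ _).mp hmax) hvne
  | some m =>
  -- B's inverted index
  set G := T.items.foldl (fun g p => g.modify p.2 [] (· ++ [p.1]))
      (PySem.Dict.empty : PySem.Dict Int (List String)) with hG
  have hGkeys : ∀ x : Int, x ∈ G.keys ↔ x ∈ T.values := by
    intro x
    rw [hG, PySem.Dict.keys_foldl_modify_key T.items Prod.snd [] (fun d p v => v ++ [p.1])
          PySem.Dict.empty,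
        show (PySem.Dict.empty : PySem.Dict Int (List String)).keys = [] from rfl,
        PySem.Set.mem_update]
    simp [show T.values = T.items.map Prod.snd from rfl]
  -- B picks the same maximum
  have hGmax : PySem.List.max? G.keys (fun v => v) = some m := by
    have hm : m ∈ G.keys := (hGkeys m).mpr (PySem.List.max?_mem hmax)
    cases hb : PySem.List.max? G.keys (fun v => v) with
    | none => exact absurd ((PySem.List.max?_eq_none_iff _ _).mp hb) (List.ne_nil_of_mem hm)
    | some b =>
        have h1 : b ≤ m := PySem.List.max?_isMax hmax _ ((hGkeys b).mp (PySem.List.max?_mem hb))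
        have h2 : m ≤ b := PySem.List.max?_isMax hb _ hm
        rw [le_antisymm h1 h2]
  -- the winning bucket is A's filtered key list
  have hbucket : G.getD m [] = (T.items.filter (fun p => p.2 == m)).map Prod.fst := by
    have hswap : (T.items.map (fun p => (p.2, p.1))).foldl
          (fun g p => g.modify p.1 [] (· ++ [p.2]))
          (PySem.Dict.empty : PySem.Dict Int (List String))
        = T.items.foldl (fun g p => g.modify p.2 [] (· ++ [p.1]))
          (PySem.Dict.empty : PySem.Dict Int (List String)) := List.foldl_map ..
    rw [hG, ← hswap, PySem.Dict.getD_foldl_modify_append,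
        PySem.Dict.getD_of_not_contains _ _ (PySem.Dict.contains_empty m)]
    simp [List.filter_map, Function.comp_def]
  have hwords : T.keys.foldl (fun ws k => if T.getD k 0 == m then ws ++ [k] else ws) []
      = (T.items.filter (fun p => p.2 == m)).map Prod.fst := by
    rw [PySem.List.foldl_append_if_eq_filter, List.nil_append,
        show T.keys = T.items.map Prod.fst from rfl, List.filter_map]
    congr 1
    apply List.filter_congr
    intro p hp
    simp only [Function.comp_def]
    rw [PySem.Dict.getD_of_mem_items T (k := p.1) (v := p.2) (by simpa using hp) hnd]
  -- assemble
  show (sortedListOfDictMax T).getD [] =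
      (match PySem.List.max? G.keys (fun v => v) with
       | none => []
       | some best => PySem.List.sorted (G.getD best []) (fun x => x) false)
  rw [hGmax]
  unfold sortedListOfDictMax
  rw [hmax]
  simp only [Option.getD_some]
  rw [hwords, hbucket]
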